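-- pv_equiv track=rewrite | github.com/JackDra/Python_LQCD_Analysis | GammaMatricies.py | FormatOpp
-- ===== SOURCE A (Python) =====
-- def FormatOpp(opp,combProjGamma=True):
--     thisProj,thisopp,iscmplx,isneg = (),(),False,False
--     for iopp in opp:
--         if iopp not in ['Top','Wein','cmplx','neg']:
--             if 'P' in iopp:
--                 thisProj = (iopp,)
--             else:
--                 thisopp += (iopp,)
--         elif iopp == 'cmplx':
--             iscmplx = True
--         elif iopp == 'neg':
--             isneg = True
--     if combProjGamma:
--         return thisProj+thisopp,iscmplx,isneg
--     else:
--         return thisProj,thisopp,iscmplx,isneg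
-- ===== SOURCE B (Python) =====
-- def FormatOpp(opp, combProjGamma=True):
--     keywords = ('Top', 'Wein', 'cmplx', 'neg')
--     iscmplx = 'cmplx' in opp
--     isneg = 'neg' in opp
--     plain = [x for x in opp if x not in keywords]
--     thisopp = tuple(x for x in plain if 'P' not in x)
--     projs = [x for x in plain if 'P' in x]
--     thisProj = (projs[-1],) if projs else ()
--     if combProjGamma:
--         return thisProj + thisopp, iscmplx, isneg
--     return thisProj, thisopp, iscmplx, isneg
-- ===== Notes on version B (the rewrite author's own statement) =====
-- stated objective: simpler
-- what changed: Replaces A's single stateful loop (tuple accumulator, proj overwrite, two flag variables) by direct membership tests for the flags and three filter comprehensions, taking the last 'P'-element for the projector.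
-- outside the precondition, e.g. on FormatOpp(['g5'], False): A returns ((), ('g5',), False, False), B returns ((), ('g5',), False, False)
import Mathlib
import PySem

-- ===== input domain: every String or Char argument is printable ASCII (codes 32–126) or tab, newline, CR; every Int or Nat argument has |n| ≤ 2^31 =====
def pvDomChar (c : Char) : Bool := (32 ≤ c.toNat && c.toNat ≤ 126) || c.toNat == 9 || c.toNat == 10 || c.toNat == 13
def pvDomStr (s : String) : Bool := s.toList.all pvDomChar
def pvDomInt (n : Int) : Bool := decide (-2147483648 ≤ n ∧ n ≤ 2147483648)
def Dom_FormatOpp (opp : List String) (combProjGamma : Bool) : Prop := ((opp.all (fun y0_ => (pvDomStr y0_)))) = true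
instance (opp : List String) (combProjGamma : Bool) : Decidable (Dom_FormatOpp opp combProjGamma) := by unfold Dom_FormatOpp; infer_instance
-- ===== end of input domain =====

-- B replaces A's single stateful loop by membership tests and filter comprehensions (objective: simpler).
-- With combProjGamma = False the Python returns a 4-tuple, not a value of the declared triple type; Pre_ excludes that case.

-- ===== PORT A =====
-- state = (thisProj, thisopp, iscmplx, isneg)
def FormatOpp_step (s : List String × List String × Bool × Bool) (iopp : String) :
    List String × List String × Bool × Bool :=
  if (["Top", "Wein", "cmplx", "neg"].contains iopp) = false then
    if PySem.Str.isIn "P" iopp then ([iopp], s.2.1, s.2.2.1, s.2.2.2)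
    else (s.1, s.2.1 ++ [iopp], s.2.2.1, s.2.2.2)
  else if iopp == "cmplx" then (s.1, s.2.1, true, s.2.2.2)
  else if iopp == "neg" then (s.1, s.2.1, s.2.2.1, true)
  else s

def FormatOpp (opp : List String) (combProjGamma : Bool) : List String × Bool × Bool :=
  let r := opp.foldl FormatOpp_step ([], [], false, false)
  if combProjGamma then (r.1 ++ r.2.1, r.2.2.1, r.2.2.2)
  else ([], false, false)  -- Python returns a 4-tuple here (outside the declared type); excluded by Pre_

-- ===== PORT B =====
def FormatOpp_alt (opp : List String) (combProjGamma : Bool) : List String × Bool × Bool :=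
  let kw : List String := ["Top", "Wein", "cmplx", "neg"]
  let iscmplx := opp.contains "cmplx"
  let isneg := opp.contains "neg"
  let plain := opp.filter (fun x => !(kw.contains x))
  let thisopp := plain.filter (fun x => !(PySem.Str.isIn "P" x))
  let projs := plain.filter (fun x => PySem.Str.isIn "P" x)
  let thisProj := match projs.getLast? with
    | some p => [p]
    | none => []
  if combProjGamma then (thisProj ++ thisopp, iscmplx, isneg)
  else ([], false, false)  -- Python returns a 4-tuple here (outside the declared type); excluded by Pre_

-- ===== PRECONDITION & SPEC =====
-- Pre_ excludes combProjGamma = False, where A (and B alike) return a 4-tuple (thisProj, thisopp, iscmplx, isneg),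
-- not a value of the declared List String × Bool × Bool type.
def Pre_FormatOpp (opp : List String) (combProjGamma : Bool) : Prop := combProjGamma = true
instance (opp : List String) (combProjGamma : Bool) : Decidable (Pre_FormatOpp opp combProjGamma) := by
  unfold Pre_FormatOpp; infer_instance

def pvWitness_FormatOpp : List String × Bool := (["P4", "g5", "Top", "cmplx", "gx"], true)

def Spec_FormatOpp (opp : List String) (combProjGamma : Bool) (out : List String × Bool × Bool) : Prop :=
  out = FormatOpp_alt opp combProjGamma
instance (opp : List String) (combProjGamma : Bool) (out : List String × Bool × Bool) :
    Decidable (Spec_FormatOpp opp combProjGamma out) := by unfold Spec_FormatOpp; infer_instance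

-- ===== CLAIM (what is proved, stated in full; the proofs are below) =====
def Claim_equal_FormatOpp : Prop := ∀ (opp : List String) (combProjGamma : Bool),
  Dom_FormatOpp opp combProjGamma → Pre_FormatOpp opp combProjGamma →
  Spec_FormatOpp opp combProjGamma (FormatOpp opp combProjGamma)

-- ===== LEMMAS AND PROOFS =====

def pvKw : List String := ["Top", "Wein", "cmplx", "neg"]

def pvProjs (l : List String) : List String :=
  (l.filter (fun x => !(pvKw.contains x))).filter (fun x => PySem.Str.isIn "P" x)

def pvOppOf (l : List String) : List String :=
  (l.filter (fun x => !(pvKw.contains x))).filter (fun x => !(PySem.Str.isIn "P" x))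

def pvProjAcc (l : List String) (p : List String) : List String :=
  match (pvProjs l).getLast? with
  | some x => [x]
  | none => p

lemma pvLast_cons (x : String) (ys : List String) (p : List String) :
    (match (x :: ys).getLast? with | some z => [z] | none => p)
    = (match ys.getLast? with | some z => [z] | none => [x]) := by
  rcases ys.eq_nil_or_concat with h | ⟨zs, z, h⟩ <;> subst h
  · rfl
  · simp only [List.concat_eq_append, ← List.cons_append]
    rw [List.getLast?_concat, List.getLast?_concat]

lemma pvProjs_cons_kw (x : String) (l : List String) (h : pvKw.contains x = true) :
    pvProjs (x :: l) = pvProjs l := by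
  simp only [pvProjs, List.filter_cons, h, Bool.not_true, Bool.false_eq_true, if_false]

lemma pvOppOf_cons_kw (x : String) (l : List String) (h : pvKw.contains x = true) :
    pvOppOf (x :: l) = pvOppOf l := by
  simp only [pvOppOf, List.filter_cons, h, Bool.not_true, Bool.false_eq_true, if_false]

lemma pvProjs_cons_proj (x : String) (l : List String) (h : pvKw.contains x = false)
    (hp : PySem.Str.isIn "P" x = true) : pvProjs (x :: l) = x :: pvProjs l := by
  simp only [pvProjs, List.filter_cons, h, Bool.not_false, if_true, hp]

lemma pvOppOf_cons_proj (x : String) (l : List String) (h : pvKw.contains x = false)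
    (hp : PySem.Str.isIn "P" x = true) : pvOppOf (x :: l) = pvOppOf l := by
  simp only [pvOppOf, List.filter_cons, h, Bool.not_false, if_true, hp, Bool.not_true,
    Bool.false_eq_true, if_false]

lemma pvProjs_cons_plain (x : String) (l : List String) (h : pvKw.contains x = false)
    (hp : PySem.Str.isIn "P" x = false) : pvProjs (x :: l) = pvProjs l := by
  simp only [pvProjs, List.filter_cons, h, Bool.not_false, if_true, hp, Bool.false_eq_true, if_false]

lemma pvOppOf_cons_plain (x : String) (l : List String) (h : pvKw.contains x = false)
    (hp : PySem.Str.isIn "P" x = false) : pvOppOf (x :: l) = x :: pvOppOf l := by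
  simp only [pvOppOf, List.filter_cons, h, Bool.not_false, if_true, hp, Bool.not_false]

set_option maxRecDepth 8192 in
lemma pvFold_inv (l : List String) : ∀ (p t : List String) (c n : Bool),
    l.foldl FormatOpp_step (p, t, c, n) =
      (pvProjAcc l p, t ++ pvOppOf l, c || l.contains "cmplx", n || l.contains "neg") := by
  induction l with
  | nil => intro p t c n; simp [pvProjAcc, pvProjs, pvOppOf]
  | cons x l ih =>
    intro p t c n
    rw [List.foldl_cons]
    by_cases hx : (pvKw.contains x) = true
    · have hxforms : x = "Top" ∨ x = "Wein" ∨ x = "cmplx" ∨ x = "neg" := by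
        have hx2 : (x == "Top" || (x == "Wein" || (x == "cmplx" || (x == "neg" || false)))) = true := hx
        simpa [Bool.or_eq_true, beq_iff_eq, or_assoc] using hx2
      have hstep : FormatOpp_step (p, t, c, n) x =
          (if x == "cmplx" then (p, t, true, n)
           else if x == "neg" then (p, t, c, true) else (p, t, c, n)) := by
        simp only [FormatOpp_step]
        rw [show (["Top", "Wein", "cmplx", "neg"].contains x) = true from hx]
        rfl
      have hPA : pvProjAcc (x :: l) p = pvProjAcc l p := by
        unfold pvProjAcc; rw [pvProjs_cons_kw x l hx]
      have hOO : pvOppOf (x :: l) = pvOppOf l := pvOppOf_cons_kw x l hx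
      rcases hxforms with h | h | h | h <;> subst h <;>
        rw [hstep] <;> simp only [BEq.rfl, if_true,
          show (("Top" : String) == "cmplx") = false from by decide,
          show (("Top" : String) == "neg") = false from by decide,
          show (("Wein" : String) == "cmplx") = false from by decide,
          show (("Wein" : String) == "neg") = false from by decide,
          show (("neg" : String) == "cmplx") = false from by decide,
          Bool.false_eq_true, if_false] <;>
        rw [ih, hPA, hOO] <;>
        simp [List.contains_cons]
    · have hx' : (pvKw.contains x) = false := by simpa using hx
      have hne1 : ("cmplx" = x) = False :=
        eq_false (fun h => by rw [← h] at hx'; exact absurd hx' (by decide))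
      have hne2 : ("neg" = x) = False :=
        eq_false (fun h => by rw [← h] at hx'; exact absurd hx' (by decide))
      have hc : (x :: l).contains "cmplx" = l.contains "cmplx" := by
        simp [List.contains_cons, hne1]
      have hn : (x :: l).contains "neg" = l.contains "neg" := by
        simp [List.contains_cons, hne2]
      by_cases hp : PySem.Str.isIn "P" x = true
      · have hstep : FormatOpp_step (p, t, c, n) x = ([x], t, c, n) := by
          simp only [FormatOpp_step, pvKw] at *
          rw [hx']; simp [show PySem.Chars.isIn ['P'] x.toList = true from hp]
        rw [hstep, ih, hc, hn]
        have : pvProjAcc (x :: l) p = pvProjAcc l [x] := by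
          unfold pvProjAcc
          rw [pvProjs_cons_proj _ _ hx' hp, pvLast_cons]
        rw [this, pvOppOf_cons_proj _ _ hx' hp]
      · have hp' : PySem.Str.isIn "P" x = false := by simpa using hp
        have hstep : FormatOpp_step (p, t, c, n) x = (p, t ++ [x], c, n) := by
          simp only [FormatOpp_step, pvKw] at *
          rw [hx']; simp [show PySem.Chars.isIn ['P'] x.toList = false from hp']
        rw [hstep, ih, hc, hn]
        have hpa : pvProjAcc (x :: l) p = pvProjAcc l p := by
          unfold pvProjAcc; rw [pvProjs_cons_plain _ _ hx' hp']
        rw [hpa, pvOppOf_cons_plain _ _ hx' hp', List.append_assoc]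
        rfl

-- ===== VERDICT (by name: the statement is the Claim_ definition above) =====
theorem FormatOpp_spec : Claim_equal_FormatOpp := by
  intro opp combProjGamma _ hpre
  unfold Pre_FormatOpp at hpre
  subst hpre
  unfold Spec_FormatOpp FormatOpp FormatOpp_alt
  rw [pvFold_inv]
  simp only [Bool.false_or, List.nil_append, if_true]
  rfl
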